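-- pv_equiv track=rewrite | github.com/yuuforest/Personal-Project | python/탐욕법(Greedy)/체육복.py | solution
-- ===== SOURCE A (Python) =====
-- def solution(n, lost, reserve):
--     answer = 0
--
--     nlost = list(set(lost) - set(reserve))
--     nreserve = set(reserve) - set(lost)
--
--     nlost.sort()
--
--     for num in nlost:
--         if num-1 in nreserve:
--             nreserve.remove(num-1)
--         elif num+1 in nreserve:
--             nreserve.remove(num+1)
--         else:
--             answer += 1
--
--     return n - answer
-- ===== SOURCE B (Python) =====
-- def solution(n, lost, reserve):
--     # Two-pointer merge over the two sorted deduped lists instead of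
--     # per-student set lookups.
--     L = sorted(set(lost) - set(reserve))
--     R = sorted(set(reserve) - set(lost))
--     i = j = 0
--     unmatched = 0
--     while i < len(L):
--         if j < len(R) and R[j] < L[i] - 1:
--             j += 1
--         elif j < len(R) and R[j] <= L[i] + 1:
--             i += 1
--             j += 1
--         else:
--             unmatched += 1
--             i += 1
--     return n - unmatched
-- ===== Notes on version B (the rewrite author's own statement) =====
-- stated objective: alternative
-- what changed: Replaces A's loop over sorted lost with set membership tests and removals on a mutable reserve set by a single two-pointer merge over the two sorted deduplicated lists, counting unmatched lost students.
import Mathlib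
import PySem

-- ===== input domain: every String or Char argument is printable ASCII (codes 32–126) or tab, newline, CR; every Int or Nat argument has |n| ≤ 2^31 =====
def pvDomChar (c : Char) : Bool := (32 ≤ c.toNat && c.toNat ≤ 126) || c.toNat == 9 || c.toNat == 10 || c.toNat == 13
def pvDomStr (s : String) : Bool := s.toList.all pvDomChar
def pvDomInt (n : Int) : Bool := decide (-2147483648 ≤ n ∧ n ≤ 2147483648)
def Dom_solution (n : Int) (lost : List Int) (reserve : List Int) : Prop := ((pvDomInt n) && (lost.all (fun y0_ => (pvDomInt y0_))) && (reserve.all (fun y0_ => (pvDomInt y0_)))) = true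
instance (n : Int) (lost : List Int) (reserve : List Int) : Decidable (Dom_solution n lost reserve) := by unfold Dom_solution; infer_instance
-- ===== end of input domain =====

-- B replaces A's per-lost-student set lookups/removals by a single two-pointer
-- merge over the two sorted deduplicated lists (objective: alternative).

-- ===== PORT A =====
-- for-loop over sorted nlost with state (answer, nreserve); Python's
-- nreserve.remove(x) is guarded by 'x in nreserve', so Set.discard is exact here.
def solution (n : Int) (lost : List Int) (reserve : List Int) : Int :=
  let nlost0 : PySem.Set Int := PySem.Set.diff (PySem.Set.ofList lost) (PySem.Set.ofList reserve)
  let nreserve : PySem.Set Int := PySem.Set.diff (PySem.Set.ofList reserve) (PySem.Set.ofList lost)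
  let nlost : List Int := PySem.List.sorted nlost0 (fun x => x) false
  let st := nlost.foldl (fun (st : Int × PySem.Set Int) num =>
    if PySem.Set.contains st.2 (num - 1) then (st.1, PySem.Set.discard st.2 (num - 1))
    else if PySem.Set.contains st.2 (num + 1) then (st.1, PySem.Set.discard st.2 (num + 1))
    else (st.1 + 1, st.2)) ((0 : Int), nreserve)
  n - st.1

-- ===== PORT B =====
-- the while loop of Source B: state (i, j, unmatched); recursion on the two list
-- suffixes L[i:], R[j:] replaces the index pair.
def bMatch : List Int → List Int → Int
  | [], _ => 0
  | _ :: L, [] => 1 + bMatch L []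
  | x :: L, r :: R =>
    if r < x - 1 then bMatch (x :: L) (R)
    else if r ≤ x + 1 then bMatch L R
    else 1 + bMatch L (r :: R)
termination_by L R => (L.length, R.length)

def solution_alt (n : Int) (lost : List Int) (reserve : List Int) : Int :=
  let L : List Int := PySem.List.sorted (PySem.Set.diff (PySem.Set.ofList lost) (PySem.Set.ofList reserve)) (fun x => x) false
  let R : List Int := PySem.List.sorted (PySem.Set.diff (PySem.Set.ofList reserve) (PySem.Set.ofList lost)) (fun x => x) false
  n - bMatch L R

-- ===== PRECONDITION & SPEC =====
def Spec_solution (n : Int) (lost : List Int) (reserve : List Int) (out : Int) : Prop := out = solution_alt n lost reserve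
instance (n : Int) (lost : List Int) (reserve : List Int) (out : Int) : Decidable (Spec_solution n lost reserve out) := by unfold Spec_solution; infer_instance

-- ===== CLAIM (what is proved, stated in full; the proofs are below) =====
def Claim_equal_solution : Prop := ∀ (n : Int) (lost : List Int) (reserve : List Int), Dom_solution n lost reserve → Spec_solution n lost reserve (solution n lost reserve)

-- ===== LEMMAS AND PROOFS =====

-- A's loop, answer component only (proof helper)
def aRun : List Int → PySem.Set Int → Int
  | [], _ => 0
  | num :: L, S =>
    if PySem.Set.contains S (num - 1) then aRun L (PySem.Set.discard S (num - 1))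
    else if PySem.Set.contains S (num + 1) then aRun L (PySem.Set.discard S (num + 1))
    else 1 + aRun L S

theorem foldl_eq_aRun (L : List Int) : ∀ (a : Int) (S : PySem.Set Int),
    (L.foldl (fun (st : Int × PySem.Set Int) num =>
      if PySem.Set.contains st.2 (num - 1) then (st.1, PySem.Set.discard st.2 (num - 1))
      else if PySem.Set.contains st.2 (num + 1) then (st.1, PySem.Set.discard st.2 (num + 1))
      else (st.1 + 1, st.2)) (a, S)).1 = a + aRun L S := by
  induction L with
  | nil => intro a S; simp [aRun]
  | cons num L ih =>
    intro a S
    simp only [List.foldl_cons, aRun]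
    split_ifs with h1 h2
    · rw [ih]
    · rw [ih]
    · rw [ih]; ring

theorem aRun_eq_bMatch : ∀ (L R : List Int) (S : PySem.Set Int) (b : Int),
    L.Pairwise (· < ·) → R.Pairwise (· < ·) →
    (∀ x ∈ L, x ∉ S) →
    (∀ x ∈ L, b ≤ x - 1) →
    (∀ v : Int, b ≤ v → (v ∈ S ↔ v ∈ R)) →
    aRun L S = bMatch L R := by
  intro L
  induction L with
  | nil => intro R S b _ _ _ _ _; cases R <;> simp [aRun, bMatch]
  | cons num L ihL =>
    intro R
    induction R with
    | nil =>
      intro S b hL hR hdisj hbL hmem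
      have hb : b ≤ num - 1 := hbL num (by simp)
      have h1 : ¬ PySem.Set.contains S (num - 1) = true := by
        rw [PySem.Set.contains_iff]
        intro h; exact absurd ((hmem _ hb).mp h) (List.not_mem_nil)
      have h2 : ¬ PySem.Set.contains S (num + 1) = true := by
        rw [PySem.Set.contains_iff]
        intro h; exact absurd ((hmem _ (by omega)).mp h) (List.not_mem_nil)
      rw [aRun, if_neg h1, if_neg h2, bMatch]
      congr 1
      refine ihL [] S num (hL.of_cons) (by simp) (fun x hx => hdisj x (by simp [hx]))
        (fun x hx => by have := List.rel_of_pairwise_cons hL hx; omega) (fun v hv => ?_)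
      constructor
      · intro hvS; exact absurd ((hmem v (by omega)).mp hvS) (List.not_mem_nil)
      · intro h; exact absurd h List.not_mem_nil
    | cons r R ihR =>
      intro S b hL hR hdisj hbL hmem
      have hb : b ≤ num - 1 := hbL num (by simp)
      have hnumS : num ∉ S := hdisj num (by simp)
      have hLtail : ∀ x ∈ L, num < x := fun x hx => List.rel_of_pairwise_cons hL hx
      have hRtail : ∀ x ∈ R, r < x := fun x hx => List.rel_of_pairwise_cons hR hx
      by_cases hc1 : r < num - 1
      · -- B skips r; the dropped reserve is below every future lost - 1
        have step : aRun (num :: L) S = bMatch (num :: L) R := by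
          refine ihR S (max b (r + 1)) hL (hR.of_cons) hdisj
            (fun x hx => ?_) (fun v hv => ?_)
          · rcases List.mem_cons.mp hx with h | h
            · subst h; have := hbL x (by simp); omega
            · have := hLtail x h; have := hbL num (by simp); omega
          · rw [hmem v (by omega)]
            constructor
            · intro h
              rcases List.mem_cons.mp h with h | h
              · omega
              · exact h
            · intro h; exact List.mem_cons_of_mem r h
        rw [step, bMatch, if_pos hc1]
      · by_cases hc2 : r ≤ num + 1
        · -- match: r must be num-1 or num+1 (num itself is never in R)
          have hnumR : num ∉ r :: R := fun h => hnumS ((hmem num (by omega)).mpr h)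
          have hrne : r ≠ num := fun h => hnumR (by simp [h])
          have ihcall : ∀ S' : PySem.Set Int, (∀ x ∈ L, x ∉ S') →
              (∀ v : Int, num ≤ v → (v ∈ S' ↔ v ∈ R)) → aRun L S' = bMatch L R := by
            intro S' h1' h2'
            exact ihL R S' num (hL.of_cons) (hR.of_cons) h1'
              (fun x hx => by have := hLtail x hx; omega) h2'
          by_cases hr1 : r = num - 1
          · have hmem1 : PySem.Set.contains S (num - 1) = true := by
              rw [PySem.Set.contains_iff, hmem (num - 1) hb]; simp [hr1]
            rw [bMatch, if_neg hc1, if_pos hc2, aRun, if_pos hmem1]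
            refine ihcall _ (fun x hx hxin => ?_) (fun v hv => ?_)
            · rw [PySem.Set.mem_discard] at hxin; exact hdisj x (by simp [hx]) hxin.1
            · rw [PySem.Set.mem_discard, hmem v (by omega)]
              constructor
              · rintro ⟨h, hne⟩
                rcases List.mem_cons.mp h with h' | h'
                · omega
                · exact h'
              · intro h; exact ⟨List.mem_cons_of_mem r h, by have := hRtail v h; omega⟩
          · -- r = num + 1
            have hr2 : r = num + 1 := by omega
            have hmem1 : ¬ PySem.Set.contains S (num - 1) = true := by
              rw [PySem.Set.contains_iff, hmem (num - 1) hb]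
              intro h
              rcases List.mem_cons.mp h with h' | h'
              · omega
              · have := hRtail _ h'; omega
            have hmem2 : PySem.Set.contains S (num + 1) = true := by
              rw [PySem.Set.contains_iff, hmem (num + 1) (by omega)]; simp [hr2]
            rw [bMatch, if_neg hc1, if_pos hc2, aRun, if_neg hmem1, if_pos hmem2]
            refine ihcall _ (fun x hx hxin => ?_) (fun v hv => ?_)
            · rw [PySem.Set.mem_discard] at hxin; exact hdisj x (by simp [hx]) hxin.1
            · rw [PySem.Set.mem_discard, hmem v (by omega)]
              constructor
              · rintro ⟨h, hne⟩
                rcases List.mem_cons.mp h with h' | h'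
                · omega
                · exact h'
              · intro h; have := hRtail v h; exact ⟨List.mem_cons_of_mem r h, by omega⟩
        · -- r > num + 1: num is unmatched on both sides
          have hm1 : ¬ PySem.Set.contains S (num - 1) = true := by
            rw [PySem.Set.contains_iff, hmem (num - 1) hb]
            intro h
            rcases List.mem_cons.mp h with h' | h'
            · omega
            · have := hRtail _ h'; omega
          have hm2 : ¬ PySem.Set.contains S (num + 1) = true := by
            rw [PySem.Set.contains_iff, hmem (num + 1) (by omega)]
            intro h
            rcases List.mem_cons.mp h with h' | h'
            · omega
            · have := hRtail _ h'; omega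
          rw [bMatch, if_neg hc1, if_neg hc2, aRun, if_neg hm1, if_neg hm2]
          congr 1
          exact ihL (r :: R) S num (hL.of_cons) hR (fun x hx => hdisj x (by simp [hx]))
            (fun x hx => by have := hLtail x hx; omega)
            (fun v hv => hmem v (by omega))

theorem sorted_set_pairwise_lt (s : PySem.Set Int) (hs : s.Nodup) :
    (PySem.List.sorted s (fun x => x) false).Pairwise (· < ·) := by
  have h1 := PySem.List.sorted_pairwise (xs := s) (key := fun x => x)
  have h2 : (PySem.List.sorted s (fun x => x) false).Nodup :=
    (PySem.List.sorted_perm s (fun x => x) false).nodup_iff.mpr hs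
  have := h1.and h2
  exact this.imp (fun h => lt_of_le_of_ne h.1 h.2)

-- ===== VERDICT (by name: the statement is the Claim_ definition above) =====
theorem solution_spec : Claim_equal_solution := by
  intro n lost reserve hdom
  unfold Spec_solution solution solution_alt
  simp only []
  rw [foldl_eq_aRun, zero_add]
  congr 1
  set nl := PySem.Set.diff (PySem.Set.ofList lost) (PySem.Set.ofList reserve) with hnl
  set nr := PySem.Set.diff (PySem.Set.ofList reserve) (PySem.Set.ofList lost) with hnr
  have hlostDom : ∀ x ∈ lost, -2147483648 ≤ x := by
    intro x hx
    unfold Dom_solution at hdom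
    simp only [Bool.and_eq_true, List.all_eq_true] at hdom
    have := hdom.1.2 x hx
    simp [pvDomInt] at this; omega
  have hmemL : ∀ x, x ∈ PySem.List.sorted nl (fun x => x) false → x ∈ lost ∧ x ∉ nr := by
    intro x hx
    rw [PySem.List.mem_sorted] at hx
    rw [hnl, PySem.Set.mem_diff, PySem.Set.mem_ofList] at hx
    refine ⟨hx.1, ?_⟩
    rw [hnr, PySem.Set.mem_diff, PySem.Set.mem_ofList, PySem.Set.mem_ofList]
    intro h; exact h.2 hx.1
  apply aRun_eq_bMatch _ _ _ (-2147483649)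
  · exact sorted_set_pairwise_lt nl (PySem.Set.nodup_diff _ _ (PySem.Set.nodup_ofList lost))
  · exact sorted_set_pairwise_lt nr (PySem.Set.nodup_diff _ _ (PySem.Set.nodup_ofList reserve))
  · exact fun x hx => (hmemL x hx).2
  · intro x hx; have := hlostDom x (hmemL x hx).1; omega
  · intro v _; rw [PySem.List.mem_sorted]
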